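-- pv_equiv track=rewrite | github.com/Siddhartha-chauhan/IPL-data-analytics | src/matches_won-per_team_per_year.py | calculate
-- ===== SOURCE A (Python) =====
-- def calculate(data):
--     """
--     Calculates the number of matches won by each team per season.
--
--     Args:
--         data (list): List of IPL match records (dicts).
--
--     Returns:
--         dict: Nested dictionary where keys are seasons and values are
--               dictionaries of team names and their number of wins.
--               Example: { '2008': {'RCB': 9, 'MI': 8}, ... }
--     """
--     matches_won = {}
--
--     for match in data:
--         season = match["season"]
--         winner = match["winner"]
--
--         # Skip matches with no winner (e.g., abandoned matches)
--         if winner == "":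
--             continue
--
--         # Initialize season dictionary if not exists
--         if season not in matches_won:
--             matches_won[season] = {}
--         # Initialize team count if not exists
--         if winner not in matches_won[season]:
--             matches_won[season][winner] = 0
--
--         # Increment the win count for the team
--         matches_won[season][winner] += 1
--
--     return matches_won
-- ===== SOURCE B (Python) =====
-- def calculate(data):
--     # Pass 1: flat count keyed by (season, winner), skipping empty winners.
--     counts = {}
--     for match in data:
--         season = match["season"]
--         winner = match["winner"]
--         if winner == "":
--             continue
--         key = (season, winner)
--         counts[key] = counts.get(key, 0) + 1
--     # Pass 2: pivot the flat counts into the nested season -> team -> wins dict.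
--     result = {}
--     for (season, winner), c in counts.items():
--         if season not in result:
--             result[season] = {}
--         result[season][winner] = c
--     return result
-- ===== Notes on version B (the rewrite author's own statement) =====
-- stated objective: alternative
-- what changed: Replaces the fused nested-dict increment loop by a two-phase decomposition: one pass builds a flat counter keyed by (season, winner), a second pass pivots that flat mapping into the nested per-season dict.
import Mathlib
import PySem

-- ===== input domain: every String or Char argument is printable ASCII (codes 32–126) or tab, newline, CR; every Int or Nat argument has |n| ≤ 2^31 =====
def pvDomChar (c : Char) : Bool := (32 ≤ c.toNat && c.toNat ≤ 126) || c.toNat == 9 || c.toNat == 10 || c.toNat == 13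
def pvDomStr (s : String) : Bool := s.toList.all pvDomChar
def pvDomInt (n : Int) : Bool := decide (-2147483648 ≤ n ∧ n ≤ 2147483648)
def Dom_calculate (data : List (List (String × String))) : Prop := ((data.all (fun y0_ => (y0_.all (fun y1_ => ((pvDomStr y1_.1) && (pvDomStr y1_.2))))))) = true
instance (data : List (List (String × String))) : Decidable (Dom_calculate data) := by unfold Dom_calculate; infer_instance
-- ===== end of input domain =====

-- B replaces A's fused nested-dict increment loop by a count-then-reshape decomposition
-- (flat counter keyed by (season, winner), then a pivot pass); same cost, proved equal.


-- shared: 'match[k]' on the record dict (both Pythons read the two keys identically)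
def pvLookup (m : List (String × String)) (k : String) : Option String :=
  (PySem.Dict.ofList m).get? k

-- ===== PORT A =====
-- one iteration of A's loop body (skip on empty winner; init season dict / team count; += 1)
def pvStepA (mw : PySem.Dict String (PySem.Dict String Int)) (m : List (String × String)) :
    PySem.Dict String (PySem.Dict String Int) :=
  match pvLookup m "season", pvLookup m "winner" with
  | some season, some winner =>
    if winner = "" then mw
    else
      let mw1 := if mw.contains season then mw else mw.insert season PySem.Dict.empty
      let inner := mw1.getD season PySem.Dict.empty
      let inner1 := if inner.contains winner then inner else inner.insert winner (0 : Int)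
      mw1.insert season (inner1.insert winner (inner1.getD winner 0 + 1))
  | _, _ => mw  -- KeyError in Python: excluded by Pre_calculate

def calculate (data : List (List (String × String))) : List (String × List (String × Int)) :=
  ((data.foldl pvStepA PySem.Dict.empty).items).map (fun p => (p.1, p.2.items))

-- ===== PORT B =====
-- pass 1: flat counter keyed by (season, winner)
def pvStepFlat (c : PySem.Dict (String × String) Int) (m : List (String × String)) :
    PySem.Dict (String × String) Int :=
  match pvLookup m "season", pvLookup m "winner" with
  | some s, some w => if w = "" then c else c.insert (s, w) (c.getD (s, w) 0 + 1)
  | _, _ => c  -- KeyError in Python: excluded by Pre_calculate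

-- pass 2: pivot one flat item ((season, winner), c) into the nested dict
def pvPivotStep (r : PySem.Dict String (PySem.Dict String Int)) (p : (String × String) × Int) :
    PySem.Dict String (PySem.Dict String Int) :=
  let r1 := if r.contains p.1.1 then r else r.insert p.1.1 PySem.Dict.empty
  r1.insert p.1.1 ((r1.getD p.1.1 PySem.Dict.empty).insert p.1.2 p.2)

def calculate_alt (data : List (List (String × String))) : List (String × List (String × Int)) :=
  let counts := data.foldl pvStepFlat PySem.Dict.empty
  let result := counts.items.foldl pvPivotStep PySem.Dict.empty
  result.items.map (fun p => (p.1, p.2.items))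

-- ===== PRECONDITION & SPEC =====
-- Pre_ excludes exactly the records lacking a "season" or "winner" key, where Python's A raises KeyError.
def Pre_calculate (data : List (List (String × String))) : Prop :=
  ∀ m ∈ data, "season" ∈ m.map Prod.fst ∧ "winner" ∈ m.map Prod.fst
instance (data : List (List (String × String))) : Decidable (Pre_calculate data) := by
  unfold Pre_calculate; infer_instance
def pvWitness_calculate : (List (List (String × String))) :=
  [[("season", "2008"), ("winner", "RCB")], [("season", "2008"), ("winner", "")]]

def Spec_calculate (data : List (List (String × String))) (out : List (String × List (String × Int))) : Prop := out = calculate_alt data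
instance (data : List (List (String × String))) (out : List (String × List (String × Int))) : Decidable (Spec_calculate data out) := by unfold Spec_calculate; infer_instance

-- ===== CLAIM (what is proved, stated in full; the proofs are below) =====
def Claim_equal_calculate : Prop := ∀ (data : List (List (String × String))), Dom_calculate data → Pre_calculate data → Spec_calculate data (calculate data)

-- ===== LEMMAS AND PROOFS =====

-- two inserts at distinct keys commute when the first key is already present
theorem pv_insert_comm {κ ν : Type} [BEq κ] [LawfulBEq κ] (d : PySem.Dict κ ν) (k k' : κ)
    (v v' : ν) (h : d.contains k = true) (hne : k ≠ k') :
    (d.insert k v).insert k' v' = (d.insert k' v').insert k v := by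
  apply PySem.Dict.ext
  by_cases hc : d.contains k' = true
  · simp only [PySem.Dict.items_insert, PySem.Dict.contains_insert, h, hc,
      Bool.or_true, if_true, List.map_map]
    refine List.map_congr_left ?_
    intro p _
    simp only [Function.comp]
    by_cases h1 : p.1 = k <;> by_cases h2 : p.1 = k' <;>
      simp_all [beq_iff_eq, Ne.symm hne]
  · have hcf : d.contains k' = false := by simpa using hc
    simp only [PySem.Dict.items_insert, PySem.Dict.contains_insert, h, hcf,
      beq_iff_eq, Ne.symm hne, if_true, if_false, Bool.or_false, Bool.or_true]
    simp [beq_iff_eq, Ne.symm hne]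

-- canonical form of B's pivot step
theorem pvPivotStep_eq (r : PySem.Dict String (PySem.Dict String Int)) (s w : String) (c : Int) :
    pvPivotStep r ((s, w), c)
      = r.insert s ((r.getD s PySem.Dict.empty).insert w c) := by
  unfold pvPivotStep
  by_cases hc : r.contains s = true
  · simp [hc]
  · have hcf : r.contains s = false := by simpa using hc
    simp [hcf, PySem.Dict.insert_insert_self, PySem.Dict.getD_insert_self,
      PySem.Dict.getD_of_not_contains _ _ hcf]

-- canonical form of A's non-skip body
theorem pvStepA_core_eq (mw : PySem.Dict String (PySem.Dict String Int)) (s w : String) :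
    (let mw1 := if mw.contains s then mw else mw.insert s PySem.Dict.empty
     let inner := mw1.getD s PySem.Dict.empty
     let inner1 := if inner.contains w then inner else inner.insert w (0 : Int)
     mw1.insert s (inner1.insert w (inner1.getD w 0 + 1)))
      = mw.insert s ((mw.getD s PySem.Dict.empty).insert w
          ((mw.getD s PySem.Dict.empty).getD w 0 + 1)) := by
  have hmw1 : (if mw.contains s then mw else mw.insert s PySem.Dict.empty).getD s PySem.Dict.empty
      = mw.getD s PySem.Dict.empty := by
    by_cases hc : mw.contains s = true
    · simp [hc]
    · have hcf : mw.contains s = false := by simpa using hc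
      simp [hcf, PySem.Dict.getD_insert_self, PySem.Dict.getD_of_not_contains _ _ hcf]
  simp only [hmw1]
  set inner := mw.getD s PySem.Dict.empty with hinner
  have houter : ∀ X : PySem.Dict String Int,
      (if mw.contains s then mw else mw.insert s PySem.Dict.empty).insert s X = mw.insert s X := by
    intro X
    by_cases hc : mw.contains s = true
    · simp [hc]
    · simp [hc, PySem.Dict.insert_insert_self]
  rw [houter]
  by_cases hw : inner.contains w = true
  · simp [hw]
  · have hwf : inner.contains w = false := by simpa using hw
    simp [hwf, PySem.Dict.insert_insert_self, PySem.Dict.getD_insert_self,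
      PySem.Dict.getD_of_not_contains _ _ hwf]

theorem pv_contains_of_inner (r : PySem.Dict String (PySem.Dict String Int)) (s w : String)
    (h : (r.getD s PySem.Dict.empty).contains w = true) : r.contains s = true := by
  by_contra hc
  have hcf : r.contains s = false := by simpa using hc
  rw [PySem.Dict.getD_of_not_contains _ _ hcf] at h
  simp [PySem.Dict.contains_empty] at h

-- a pivot step at a different (season, winner) key leaves the (s, w) cell's lookup unchanged
theorem pv_step_untouched (s w : String) (q : (String × String) × Int) (hq : q.1 ≠ (s, w))
    (r : PySem.Dict String (PySem.Dict String Int)) :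
    ((pvPivotStep r q).getD s PySem.Dict.empty).get? w
      = (r.getD s PySem.Dict.empty).get? w := by
  obtain ⟨⟨s2, w2⟩, c2⟩ := q
  rw [pvPivotStep_eq]
  by_cases hs : s = s2
  · subst hs
    have hw : w ≠ w2 := by intro hw; exact hq (by simp [hw])
    rw [PySem.Dict.getD_insert_self, PySem.Dict.get?_insert]
    simp [hw]
  · rw [PySem.Dict.getD_insert]
    simp [hs]

theorem pv_pivot_untouched (s w : String) (l : List ((String × String) × Int))
    (h : ∀ q ∈ l, q.1 ≠ (s, w)) (r : PySem.Dict String (PySem.Dict String Int)) :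
    ((l.foldl pvPivotStep r).getD s PySem.Dict.empty).get? w
      = (r.getD s PySem.Dict.empty).get? w := by
  induction l generalizing r with
  | nil => rfl
  | cons q l ih =>
    rw [List.foldl_cons, ih (fun q' hq' => h q' (List.mem_cons_of_mem _ hq')),
      pv_step_untouched s w q (h q (List.mem_cons_self ..)) r]

-- overwriting the (s, w) cell commutes with a pivot step at any other key
theorem pv_upd_comm (s w : String) (v : Int) (q : (String × String) × Int) (hq : q.1 ≠ (s, w))
    (r : PySem.Dict String (PySem.Dict String Int))
    (hw : (r.getD s PySem.Dict.empty).contains w = true) :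
    pvPivotStep (r.insert s ((r.getD s PySem.Dict.empty).insert w v)) q
      = (pvPivotStep r q).insert s
          (((pvPivotStep r q).getD s PySem.Dict.empty).insert w v) := by
  obtain ⟨⟨s2, w2⟩, c2⟩ := q
  have hs : r.contains s = true := pv_contains_of_inner r s w hw
  rw [pvPivotStep_eq, pvPivotStep_eq]
  by_cases hss : s2 = s
  · subst hss
    have hww : w ≠ w2 := by intro hww; exact hq (by simp [hww])
    rw [PySem.Dict.getD_insert_self, PySem.Dict.getD_insert_self,
      PySem.Dict.insert_insert_self, PySem.Dict.insert_insert_self,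
      pv_insert_comm _ _ _ _ _ hw hww]
  · rw [PySem.Dict.getD_insert, if_neg hss, PySem.Dict.getD_insert, if_neg (Ne.symm hss),
      pv_insert_comm _ _ _ _ _ hs (Ne.symm hss)]

theorem pv_pivot_upd_comm (s w : String) (v : Int) (l : List ((String × String) × Int))
    (h : ∀ q ∈ l, q.1 ≠ (s, w)) (r : PySem.Dict String (PySem.Dict String Int))
    (hw : (r.getD s PySem.Dict.empty).contains w = true) :
    l.foldl pvPivotStep (r.insert s ((r.getD s PySem.Dict.empty).insert w v))
      = (l.foldl pvPivotStep r).insert s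
          (((l.foldl pvPivotStep r).getD s PySem.Dict.empty).insert w v) := by
  induction l generalizing r with
  | nil => rfl
  | cons q l ih =>
    rw [List.foldl_cons, List.foldl_cons,
      pv_upd_comm s w v q (h q (List.mem_cons_self ..)) r hw,
      ih (fun q' hq' => h q' (List.mem_cons_of_mem _ hq'))]
    rw [PySem.Dict.contains_eq_isSome_get?,
      pv_step_untouched s w q (h q (List.mem_cons_self ..)) r,
      ← PySem.Dict.contains_eq_isSome_get?]
    exact hw

-- the pivot's (s, w) cell holds exactly the flat count stored at key (s, w)
theorem pv_pivot_get? (s w : String) (c : Int) (l : List ((String × String) × Int))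
    (hnd : (l.map Prod.fst).Nodup) (hm : ((s, w), c) ∈ l)
    (r : PySem.Dict String (PySem.Dict String Int)) :
    ((l.foldl pvPivotStep r).getD s PySem.Dict.empty).get? w = some c := by
  induction l generalizing r with
  | nil => simp at hm
  | cons q l ih =>
    simp only [List.map_cons, List.nodup_cons] at hnd
    by_cases hk : q.1 = (s, w)
    · have hq2 : q = ((s, w), c) := by
        rcases List.mem_cons.mp hm with h1 | h2
        · exact h1.symm
        · exact absurd (by rw [hk]; exact List.mem_map_of_mem h2) hnd.1
      have hnot : ∀ q' ∈ l, q'.1 ≠ (s, w) := by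
        intro q' hq' he
        apply hnd.1
        rw [hk, ← he]
        exact List.mem_map_of_mem hq' 
      rw [List.foldl_cons, pv_pivot_untouched s w l hnot, hq2, pvPivotStep_eq,
        PySem.Dict.getD_insert_self, PySem.Dict.get?_insert_self]
    · have hm' : ((s, w), c) ∈ l := by
        rcases List.mem_cons.mp hm with h1 | h2
        · exact absurd (by rw [← h1]) hk
        · exact h2
      rw [List.foldl_cons, ih hnd.2 hm']

theorem pvStepA_eq (m : List (String × String)) (mw : PySem.Dict String (PySem.Dict String Int))
    (s w : String) (hs : pvLookup m "season" = some s) (hw : pvLookup m "winner" = some w)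
    (hne : ¬ w = "") :
    pvStepA mw m = mw.insert s ((mw.getD s PySem.Dict.empty).insert w
      ((mw.getD s PySem.Dict.empty).getD w 0 + 1)) := by
  unfold pvStepA
  rw [hs, hw]
  simp only [if_neg hne]
  exact pvStepA_core_eq mw s w

theorem pvStepFlat_eq (m : List (String × String)) (fd : PySem.Dict (String × String) Int)
    (s w : String) (hs : pvLookup m "season" = some s) (hw : pvLookup m "winner" = some w)
    (hne : ¬ w = "") :
    pvStepFlat fd m = fd.insert (s, w) (fd.getD (s, w) 0 + 1) := by
  unfold pvStepFlat
  rw [hs, hw]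
  simp only [if_neg hne]

-- pivoting the flat items with the (s, w) value overwritten = pivoting then overwriting the cell
theorem pv_pivot_map_overwrite (s w : String) (v c : Int) (l : List ((String × String) × Int))
    (hnd : (l.map Prod.fst).Nodup) (hm : ((s, w), c) ∈ l)
    (r : PySem.Dict String (PySem.Dict String Int)) :
    (l.map (fun p => if p.1 == (s, w) then ((s, w), v) else p)).foldl pvPivotStep r
      = (l.foldl pvPivotStep r).insert s
          (((l.foldl pvPivotStep r).getD s PySem.Dict.empty).insert w v) := by
  induction l generalizing r with
  | nil => simp at hm
  | cons q l ih =>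
    simp only [List.map_cons, List.nodup_cons] at hnd
    obtain ⟨qk, qc⟩ := q
    by_cases hk : qk = (s, w)
    · subst hk
      have hnot : ∀ q' ∈ l, q'.1 ≠ (s, w) := by
        intro q' hq' he
        exact hnd.1 (List.mem_map.mpr ⟨q', hq', he⟩)
      have hmap : l.map (fun p => if p.1 == (s, w) then ((s, w), v) else p) = l := by
        conv_rhs => rw [← List.map_id l]
        exact List.map_congr_left (fun q' hq' => by simp [beq_iff_eq, hnot q' hq'])
      have hw : (((pvPivotStep r ((s, w), qc)).getD s PySem.Dict.empty).contains w) = true := by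
        rw [pvPivotStep_eq, PySem.Dict.getD_insert_self]
        exact PySem.Dict.contains_insert_self _ _ _
      have hX : pvPivotStep r ((s, w), v)
          = (pvPivotStep r ((s, w), qc)).insert s
            (((pvPivotStep r ((s, w), qc)).getD s PySem.Dict.empty).insert w v) := by
        simp [pvPivotStep_eq, PySem.Dict.getD_insert_self, PySem.Dict.insert_insert_self]
      rw [List.map_cons, hmap, List.foldl_cons, List.foldl_cons]
      simp only [beq_self_eq_true, if_true]
      rw [hX, pv_pivot_upd_comm s w v l hnot _ hw]
    · have hm' : ((s, w), c) ∈ l := by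
        rcases List.mem_cons.mp hm with h1 | h2
        · exact absurd (congrArg Prod.fst h1).symm hk
        · exact h2
      have hbq : (((qk, qc) : (String × String) × Int).1 == (s, w)) = false := by
        simpa [beq_iff_eq] using hk
      simp only [List.map_cons, List.foldl_cons, hbq, Bool.false_eq_true, if_false]
      exact ih hnd.2 hm' _

-- main commuting step: pivot of the bumped flat counter = A's step on the pivot
theorem pv_commute (fd : PySem.Dict (String × String) Int) (hnd : fd.keys.Nodup)
    (s w : String) :
    (fd.insert (s, w) (fd.getD (s, w) 0 + 1)).items.foldl pvPivotStep PySem.Dict.empty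
      = (fd.items.foldl pvPivotStep PySem.Dict.empty).insert s
          (((fd.items.foldl pvPivotStep PySem.Dict.empty).getD s PySem.Dict.empty).insert w
            (((fd.items.foldl pvPivotStep PySem.Dict.empty).getD s PySem.Dict.empty).getD w 0 + 1)) := by
  have hkeys : (fd.items.map Prod.fst).Nodup := by
    simpa [PySem.Dict.keys] using hnd
  by_cases hc : fd.contains (s, w) = true
  · obtain ⟨c, hget⟩ : ∃ c, fd.get? (s, w) = some c := by
      rw [PySem.Dict.contains_eq_isSome_get?] at hc
      exact Option.isSome_iff_exists.mp hc
    have hgD : fd.getD (s, w) 0 = c := PySem.Dict.getD_of_get?_eq_some _ 0 hget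
    have hmem : ((s, w), c) ∈ fd.items := PySem.Dict.mem_items_of_get?_eq_some _ hget
    have hcell := pv_pivot_get? s w c fd.items hkeys hmem PySem.Dict.empty
    rw [PySem.Dict.items_insert_of_contains _ _ hc, hgD,
      pv_pivot_map_overwrite s w (c + 1) c fd.items hkeys hmem,
      PySem.Dict.getD_of_get?_eq_some _ 0 hcell]
  · have hcf : fd.contains (s, w) = false := by simpa using hc
    have hnot : ∀ q ∈ fd.items, q.1 ≠ (s, w) := by
      intro q hq he
      have hk : q.1 ∈ fd.keys := PySem.Dict.mem_keys_of_mem_items _ hq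
      rw [he] at hk
      rw [(PySem.Dict.contains_iff_mem_keys fd (s, w)).mpr hk] at hcf
      exact Bool.true_eq_false.mp hcf
    have hcell : ((fd.items.foldl pvPivotStep PySem.Dict.empty).getD s PySem.Dict.empty).get? w
        = none := by
      rw [pv_pivot_untouched s w fd.items hnot]
      simp [PySem.Dict.getD_empty, PySem.Dict.get?_empty]
    rw [PySem.Dict.items_insert_of_not_contains _ _ hcf,
      PySem.Dict.getD_of_not_contains _ 0 hcf, List.foldl_append, List.foldl_cons,
      List.foldl_nil, pvPivotStep_eq, PySem.Dict.getD_eq_get?_getD _ w 0, hcell]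
    rfl

theorem pv_main (data : List (List (String × String))) :
    ∀ (fd : PySem.Dict (String × String) Int), fd.keys.Nodup →
    data.foldl pvStepA (fd.items.foldl pvPivotStep PySem.Dict.empty)
      = (data.foldl pvStepFlat fd).items.foldl pvPivotStep PySem.Dict.empty := by
  induction data with
  | nil => intro fd _; rfl
  | cons m data ih =>
    intro fd hnd
    rw [List.foldl_cons, List.foldl_cons]
    cases hs : pvLookup m "season" with
    | none =>
      have ha : pvStepA (fd.items.foldl pvPivotStep PySem.Dict.empty) m
          = fd.items.foldl pvPivotStep PySem.Dict.empty := by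
        unfold pvStepA; rw [hs]
      have hb : pvStepFlat fd m = fd := by
        unfold pvStepFlat; rw [hs]
      rw [ha, hb]
      exact ih fd hnd
    | some s =>
      cases hw : pvLookup m "winner" with
      | none =>
        have ha : pvStepA (fd.items.foldl pvPivotStep PySem.Dict.empty) m
            = fd.items.foldl pvPivotStep PySem.Dict.empty := by
          unfold pvStepA; rw [hs, hw]
        have hb : pvStepFlat fd m = fd := by
          unfold pvStepFlat; rw [hs, hw]
        rw [ha, hb]
        exact ih fd hnd
      | some w =>
        by_cases hempty : w = ""
        · have ha : pvStepA (fd.items.foldl pvPivotStep PySem.Dict.empty) m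
              = fd.items.foldl pvPivotStep PySem.Dict.empty := by
            unfold pvStepA; rw [hs, hw]; simp [hempty]
          have hb : pvStepFlat fd m = fd := by
            unfold pvStepFlat; rw [hs, hw]; simp [hempty]
          rw [ha, hb]
          exact ih fd hnd
        · rw [pvStepA_eq m _ s w hs hw hempty, pvStepFlat_eq m fd s w hs hw hempty,
            ← pv_commute fd hnd s w]
          exact ih _ (PySem.Dict.nodup_keys_insert _ _ _ hnd)

-- ===== VERDICT (by name: the statement is the Claim_ definition above) =====
theorem calculate_spec : Claim_equal_calculate := by
  intro data _ _
  unfold Spec_calculate calculate calculate_alt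
  have h := pv_main data PySem.Dict.empty PySem.Dict.nodup_keys_empty
  exact congrArg (fun d : PySem.Dict String (PySem.Dict String Int) =>
    d.items.map fun p => (p.1, p.2.items)) h
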